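-- pv_equiv track=rewrite | github.com/MizunoPK/FantasyFootballHelperScripts | league_helper/trade_simulator_mode/trade_input_parser.py | parse_player_selection
-- ===== SOURCE A (Python) =====
-- from typing import List, Optional, Tuple
--
-- def parse_player_selection(input_str: str, max_index: int) -> Optional[List[int]]:
--     """
--     Parse comma-separated player numbers from user input.
--
--     Args:
--         input_str (str): User input string with comma-separated numbers
--         max_index (int): Maximum valid index (1-based)
--
--     Returns:
--         Optional[List[int]]: List of valid 1-based indices, or None if:
--             - Input is 'exit' (case-insensitive)
--             - Input contains invalid characters
--             - Any number is out of range [1, max_index]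
--             - Duplicate numbers detected
--             - Empty input
--
--     Examples:
--         >>> parse_player_selection("1,2,3", 5)
--         [1, 2, 3]
--         >>> parse_player_selection("1, 2, 3", 5)  # Spaces accepted
--         [1, 2, 3]
--         >>> parse_player_selection("exit", 5)
--         None
--         >>> parse_player_selection("1,99", 5)
--         None
--     """
--     # STEP 1: Clean input (remove leading/trailing whitespace)
--     input_str = input_str.strip()
--
--     # STEP 2: Check for exit command (case-insensitive)
--     # User can type "exit", "EXIT", "Exit", etc. to cancel operation
--     if input_str.lower() == 'exit':
--         return None
--
--     # STEP 3: Reject empty input (after stripping whitespace)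
--     if not input_str:
--         return None
--
--     # STEP 4: Split by comma and clean each part
--     # Handles: "1,2,3" or "1, 2, 3" or "1 , 2 , 3"
--     parts = [part.strip() for part in input_str.split(',')]
--
--     # STEP 5: Convert all parts to integers
--     # If any part contains non-numeric characters, conversion fails
--     indices = []
--     try:
--         for part in parts:
--             index = int(part)
--             indices.append(index)
--     except ValueError:
--         # Invalid characters detected (e.g., "1,abc,3")
--         return None
--
--     # STEP 6: Validate all indices are within valid range [1, max_index]
--     # Uses 1-based indexing (user sees numbers starting from 1)
--     for index in indices:
--         if index < 1 or index > max_index: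
--             # Index out of bounds
--             return None
--
--     # STEP 7: Check for duplicate selections
--     # Convert to set (removes duplicates) and compare length
--     # If lengths differ, duplicates were present
--     if len(indices) != len(set(indices)):
--         return None
--
--     # All validation passed - return parsed indices
--     return indices
-- ===== SOURCE B (Python) =====
-- from typing import List, Optional
--
--
-- def parse_player_selection(input_str: str, max_index: int) -> Optional[List[int]]:
--     """Parse comma-separated 1-based player indices.
--
--     Validates by aggregation instead of per-element scans: the range check
--     compares min/max of the parsed list against the bounds, and duplicates
--     are detected by sorting and scanning adjacent pairs (no set needed).
--     """
--     s = input_str.strip()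
--     if s.lower() == 'exit' or not s:
--         return None
--     try:
--         indices = [int(p.strip()) for p in s.split(',')]
--     except ValueError:
--         return None
--     if min(indices) < 1 or max(indices) > max_index:
--         return None
--     srt = sorted(indices)
--     if any(a == b for a, b in zip(srt, srt[1:])):
--         return None
--     return indices
-- ===== Notes on version B (the rewrite author's own statement) =====
-- stated objective: alternative
-- what changed: Replaced A's per-element range scan and set-length duplicate test with aggregate validation: compare min/max of the parsed list against the bounds, and detect duplicates by sorting and scanning adjacent pairs.
import Mathlib
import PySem

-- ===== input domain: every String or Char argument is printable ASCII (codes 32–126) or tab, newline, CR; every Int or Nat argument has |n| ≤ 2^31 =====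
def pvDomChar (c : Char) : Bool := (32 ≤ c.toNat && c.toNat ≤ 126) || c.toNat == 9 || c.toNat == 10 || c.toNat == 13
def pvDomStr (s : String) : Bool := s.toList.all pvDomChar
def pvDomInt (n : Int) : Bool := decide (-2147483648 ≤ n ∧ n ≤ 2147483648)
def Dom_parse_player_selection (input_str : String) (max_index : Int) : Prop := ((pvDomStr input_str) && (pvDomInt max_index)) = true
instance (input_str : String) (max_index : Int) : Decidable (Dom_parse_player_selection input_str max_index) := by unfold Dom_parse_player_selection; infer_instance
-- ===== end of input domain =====

-- B validates by aggregation instead of per-element scans: min/max against the bounds and a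
-- sort-then-adjacent-pair scan for duplicates, in place of A's range loop and set-length test.

-- ===== PORT A =====
-- STEP 5 loop: convert all parts to ints; a ValueError (ofChars? = none) aborts with None
def pps_convert : List (List Char) → Option (List Int)
  | [] => some []
  | part :: rest =>
    match PySem.Int.ofChars? part with
    | none => none
    | some index =>
      match pps_convert rest with
      | none => none
      | some idxs => some (index :: idxs)

-- STEP 6 loop: return-None-on-first-out-of-range as a Bool scan
def pps_rangeOk (max_index : Int) : List Int → Bool
  | [] => true
  | index :: rest => if index < 1 || index > max_index then false else pps_rangeOk max_index rest

def parse_player_selection (input_str : String) (max_index : Int) : Option (List Int) :=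
  let s := PySem.Str.strip input_str
  if PySem.Str.lower s == "exit" then none
  else if s == "" then none
  else
    let parts := (PySem.Chars.splitOn s.toList [',']).map PySem.Chars.strip
    match pps_convert parts with
    | none => none
    | some indices =>
      if pps_rangeOk max_index indices = false then none
      else if indices.length ≠ (PySem.Set.ofList indices).length then none
      else some indices

-- ===== PORT B =====
-- the comprehension [int(p.strip()) for p in s.split(',')] under try (first ValueError aborts)
def ppsB_ints : List (List Char) → Option (List Int)
  | [] => some []
  | p :: rest =>
    match PySem.Int.ofChars? (PySem.Chars.strip p) with
    | none => none
    | some v =>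
      match ppsB_ints rest with
      | none => none
      | some vs => some (v :: vs)

-- any(a == b for a, b in zip(srt, srt[1:]))
def ppsB_adjDup (srt : List Int) : Bool :=
  (srt.zip srt.tail).any (fun p => p.1 == p.2)

def parse_player_selection_alt (input_str : String) (max_index : Int) : Option (List Int) :=
  let s := PySem.Str.strip input_str
  if PySem.Str.lower s == "exit" || s == "" then none
  else
    match ppsB_ints (PySem.Chars.splitOn s.toList [',']) with
    | none => none
    | some indices =>
      -- min(indices) / max(indices); the list is nonempty (split yields ≥ 1 part), so the
      -- catch-all branch that totalizes Python's min/max is unreachable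
      match PySem.List.min? indices (fun x => x), PySem.List.max? indices (fun x => x) with
      | some mn, some mx =>
        if mn < 1 || mx > max_index then none
        else if ppsB_adjDup (PySem.List.sorted indices (fun x => x) false) then none
        else some indices
      | _, _ => none

-- ===== PRECONDITION & SPEC =====
def Spec_parse_player_selection (input_str : String) (max_index : Int) (out : Option (List Int)) : Prop := out = parse_player_selection_alt input_str max_index
instance (input_str : String) (max_index : Int) (out : Option (List Int)) : Decidable (Spec_parse_player_selection input_str max_index out) := by unfold Spec_parse_player_selection; infer_instance

-- ===== CLAIM (what is proved, stated in full; the proofs are below) =====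
def Claim_equal_parse_player_selection : Prop := ∀ (input_str : String) (max_index : Int), Dom_parse_player_selection input_str max_index → Spec_parse_player_selection input_str max_index (parse_player_selection input_str max_index)

-- ===== LEMMAS AND PROOFS =====

-- B's conversion is A's conversion of the pre-stripped parts
lemma ppsB_ints_eq (ps : List (List Char)) :
    ppsB_ints ps = pps_convert (ps.map PySem.Chars.strip) := by
  induction ps with
  | nil => rfl
  | cons p rest ih => simp only [ppsB_ints, List.map_cons, pps_convert, ih]

-- split always yields at least one piece
lemma pps_go_ne_nil (sep : List Char) (fuel : Nat) (l cur : List Char) (acc : List (List Char)) :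
    PySem.Chars.splitOn.go sep fuel l cur acc ≠ [] := by
  induction fuel generalizing l cur acc with
  | zero => simp [PySem.Chars.splitOn.go]
  | succ fuel ih =>
    cases l with
    | nil => simp [PySem.Chars.splitOn.go]
    | cons c rest =>
      rw [PySem.Chars.splitOn.go]
      split_ifs with h
      · exact ih _ _ _
      · exact ih _ _ _

lemma pps_splitOn_ne_nil (s sep : List Char) : PySem.Chars.splitOn s sep ≠ [] :=
  pps_go_ne_nil sep _ s [] []

-- successful conversion preserves nonemptiness
lemma pps_convert_ne_nil {ps : List (List Char)} {xs : List Int}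
    (h : pps_convert ps = some xs) (hne : ps ≠ []) : xs ≠ [] := by
  cases ps with
  | nil => exact absurd rfl hne
  | cons p rest =>
    simp only [pps_convert] at h
    cases hp : PySem.Int.ofChars? p with
    | none => rw [hp] at h; exact absurd h (by simp)
    | some v =>
      rw [hp] at h
      cases hr : pps_convert rest with
      | none => rw [hr] at h; exact absurd h (by simp)
      | some vs => rw [hr] at h; simp at h; simp [← h]

-- A's range scan succeeds iff every element is in [1, max_index]
lemma pps_rangeOk_iff (M : Int) (xs : List Int) :
    pps_rangeOk M xs = true ↔ ∀ x ∈ xs, 1 ≤ x ∧ x ≤ M := by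
  induction xs with
  | nil => simp [pps_rangeOk]
  | cons x t ih =>
    simp only [pps_rangeOk, List.mem_cons, forall_eq_or_imp]
    by_cases h : (x < 1 || x > M) = true
    · rw [if_pos h]
      simp only [Bool.or_eq_true, decide_eq_true_eq] at h
      constructor
      · intro hf; exact absurd hf (by simp)
      · rintro ⟨⟨h1, h2⟩, -⟩; omega
    · rw [if_neg h, ih]
      simp only [Bool.or_eq_true, decide_eq_true_eq, not_or, not_lt] at h
      exact ⟨fun hall => ⟨⟨by omega, by omega⟩, hall⟩, fun ⟨_, ht⟩ => ht⟩

-- B's min/max bound test equals the universal range condition on a nonempty list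
lemma pps_minmax_iff {xs : List Int} {mn mx M : Int}
    (hmn : PySem.List.min? xs (fun x => x) = some mn)
    (hmx : PySem.List.max? xs (fun x => x) = some mx) :
    ((mn < 1 || mx > M) = false) ↔ ∀ x ∈ xs, 1 ≤ x ∧ x ≤ M := by
  constructor
  · intro h x hx
    simp only [Bool.or_eq_false_iff, decide_eq_false_iff_not, not_lt] at h
    have h1 := PySem.List.min?_isMin hmn x hx
    have h2 := PySem.List.max?_isMax hmx x hx
    simp only at h1 h2
    omega
  · intro hall
    have h1 := hall mn (PySem.List.min?_mem hmn)
    have h2 := hall mx (PySem.List.max?_mem hmx)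
    simp only [Bool.or_eq_false_iff, decide_eq_false_iff_not, not_lt]
    omega

-- on a ≤-sorted list, no adjacent duplicates means Nodup
lemma pps_adjDup_sorted (l : List Int) (hs : l.Pairwise (· ≤ ·)) :
    ppsB_adjDup l = false ↔ l.Nodup := by
  induction l with
  | nil => simp [ppsB_adjDup]
  | cons a t ih =>
    cases t with
    | nil => simp [ppsB_adjDup]
    | cons b t' =>
      have hs' : (b :: t').Pairwise (· ≤ ·) := hs.tail
      have hab : a ≤ b := (List.pairwise_cons.mp hs).1 b (List.mem_cons_self ..)
      have hbt : ∀ x ∈ t', b ≤ x := (List.pairwise_cons.mp hs').1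
      simp only [ppsB_adjDup, List.tail_cons, List.zip_cons_cons, List.any_cons,
        Bool.or_eq_false_iff, beq_eq_false_iff_ne, ne_eq] at *
      rw [ih hs']
      constructor
      · rintro ⟨hne, hnd⟩
        refine List.nodup_cons.mpr ⟨?_, hnd⟩
        intro hmem
        rcases List.mem_cons.mp hmem with rfl | hmem'
        · exact hne rfl
        · have := hbt a hmem'; omega
      · intro hnd
        refine ⟨?_, hnd.of_cons⟩
        rintro rfl
        exact (List.nodup_cons.mp hnd).1 (List.mem_cons_self ..)

-- A's set-length duplicate test is exactly Nodup
lemma pps_len_ofList_eq_iff (xs : List Int) :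
    (PySem.Set.ofList xs).length = xs.length ↔ xs.Nodup := by
  induction xs using List.reverseRecOn with
  | nil => simp [PySem.Set.ofList_nil]
  | append_singleton xs x ih =>
    rw [PySem.Set.ofList_append_singleton]
    by_cases hx : x ∈ xs
    · rw [PySem.Set.add_of_mem (by simpa [PySem.Set.mem_ofList] using hx)]
      have hle := PySem.Set.length_ofList_le (xs := xs)
      simp only [List.length_append, List.length_singleton]
      constructor
      · intro h; omega
      · intro h
        rw [List.nodup_append] at h
        exact absurd rfl (h.2.2 x hx x (List.mem_singleton_self x))
    · rw [PySem.Set.add_of_not_mem (by simpa [PySem.Set.mem_ofList] using hx)]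
      simp only [List.length_append, List.length_singleton, List.nodup_append,
        List.nodup_singleton]
      constructor
      · intro h
        refine ⟨ih.mp (by omega), trivial, ?_⟩
        intro a ha b hb; rw [List.mem_singleton] at hb; subst hb
        exact fun h' => hx (h' ▸ ha)
      · intro h
        have := ih.mpr h.1; omega

-- ===== VERDICT (by name: the statement is the Claim_ definition above) =====
theorem parse_player_selection_spec : Claim_equal_parse_player_selection := by
  intro input_str max_index _
  unfold Spec_parse_player_selection parse_player_selection parse_player_selection_alt
  cases hexit : (PySem.Str.lower (PySem.Str.strip input_str) == "exit") with
  | true => simp [hexit]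
  | false =>
    cases hempty : ((PySem.Str.strip input_str) == "") with
    | true => simp [hexit, hempty]
    | false =>
      simp only [hexit, hempty, Bool.false_or, Bool.false_eq_true, if_false]
      rw [ppsB_ints_eq]
      cases hc : pps_convert (((PySem.Chars.splitOn (PySem.Str.strip input_str).toList [','])).map PySem.Chars.strip) with
      | none => rfl
      | some idxs =>
        dsimp only
        have hne : idxs ≠ [] := pps_convert_ne_nil hc (by
          intro h
          exact pps_splitOn_ne_nil _ _ (List.map_eq_nil_iff.mp h))
        obtain ⟨mn, hmn⟩ : ∃ mn, PySem.List.min? idxs (fun x => x) = some mn := by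
          cases h : PySem.List.min? idxs (fun x => x) with
          | none => exact absurd ((PySem.List.min?_eq_none_iff _ _).mp h) hne
          | some m => exact ⟨m, rfl⟩
        obtain ⟨mx, hmx⟩ : ∃ mx, PySem.List.max? idxs (fun x => x) = some mx := by
          cases h : PySem.List.max? idxs (fun x => x) with
          | none => exact absurd ((PySem.List.max?_eq_none_iff _ _).mp h) hne
          | some m => exact ⟨m, rfl⟩
        rw [hmn, hmx]
        dsimp only
        have hdup : ppsB_adjDup (PySem.List.sorted idxs (fun x => x) false) = false ↔ idxs.Nodup := by
          rw [pps_adjDup_sorted _ (PySem.List.sorted_pairwise idxs (fun x => x)),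
            List.Perm.nodup_iff (PySem.List.sorted_perm idxs (fun x => x) false)]
        by_cases hr : pps_rangeOk max_index idxs = true
        · have hmm : (mn < 1 || mx > max_index) = false :=
            (pps_minmax_iff hmn hmx).mpr ((pps_rangeOk_iff _ _).mp hr)
          by_cases hd : idxs.Nodup
          · have hadj : ppsB_adjDup (PySem.List.sorted idxs (fun x => x) false) = false := hdup.mpr hd
            have hlen : (PySem.Set.ofList idxs).length = idxs.length := (pps_len_ofList_eq_iff idxs).mpr hd
            simp [hr, hmm, hadj, hlen]
          · have hadj : ppsB_adjDup (PySem.List.sorted idxs (fun x => x) false) = true := by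
              cases hb : ppsB_adjDup (PySem.List.sorted idxs (fun x => x) false) with
              | false => exact absurd (hdup.mp hb) hd
              | true => rfl
            have hlen : idxs.length ≠ (PySem.Set.ofList idxs).length := by
              intro h; exact hd ((pps_len_ofList_eq_iff idxs).mp h.symm)
            simp [hr, hmm, hadj, hlen]
        · have hrf : pps_rangeOk max_index idxs = false := eq_false_of_ne_true hr
          have hmm : (mn < 1 || mx > max_index) = true := by
            cases h : (mn < 1 || mx > max_index) with
            | true => rfl
            | false => exact absurd ((pps_rangeOk_iff _ _).mpr ((pps_minmax_iff hmn hmx).mp h)) hr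
          simp [hrf, hmm]
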